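-- pv_equiv track=rewrite | github.com/katestorres/SchoolAssignments | dragon.py | unfold_dragon
-- ===== SOURCE A (Python) =====
-- def unfold_dragon(n):
--     seq =[0]
--     while(len(seq)<n):
--         temp = []
--         for i in range(len(seq)):
--             temp.append(seq[-(i+1)])
--         seq.append(0)
--         for i in range(len(temp)):
--             if(temp[i]==0):
--                 temp[i]=1
--             else:
--                 temp[i]=0
--         seq=seq+temp
--     return seq[0:n]
-- ===== SOURCE B (Python) =====
-- def unfold_dragon(n):
--     res = []
--     for i in range(n):
--         k = i + 1
--         while k % 2 == 0:
--             k //= 2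
--         res.append(0 if k % 4 == 1 else 1)
--     return res
-- ===== Notes on version B (the rewrite author's own statement) =====
-- stated objective: simpler
-- what changed: Replaced the geometric grow-by-reverse-and-complement construction with the closed-form paper-folding formula computed independently per index (strip trailing binary zeros of i+1, test mod 4).
import Mathlib
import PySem

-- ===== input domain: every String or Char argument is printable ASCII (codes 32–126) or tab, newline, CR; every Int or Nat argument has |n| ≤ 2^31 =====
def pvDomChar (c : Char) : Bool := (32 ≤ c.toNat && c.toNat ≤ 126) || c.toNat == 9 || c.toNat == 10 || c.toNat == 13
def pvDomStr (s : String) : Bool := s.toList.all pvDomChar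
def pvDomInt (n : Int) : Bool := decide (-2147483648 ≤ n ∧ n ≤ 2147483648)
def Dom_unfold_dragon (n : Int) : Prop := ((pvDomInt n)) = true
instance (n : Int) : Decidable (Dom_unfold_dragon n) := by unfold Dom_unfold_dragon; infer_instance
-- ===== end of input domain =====

-- B replaces A's iterative reverse/complement doubling with the closed-form per-index paper-folding formula (objective: simpler).


-- ===== PORT A =====
-- one body iteration of A's while loop: build temp (reversed seq via negative indexing),
-- append 0, complement temp in place (each position rewritten once from its own old value,
-- ported as a map), concatenate
def aStep (seq : List Int) : List Int :=
  let temp := (PySem.List.pyRange 0 (seq.length : Int) 1).foldl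
      (fun acc i => acc ++ [PySem.List.pyGetD seq (-(i + 1)) 0]) ([] : List Int)
  let seq1 := seq ++ [0]
  let temp1 := temp.map (fun x => if x == 0 then (1 : Int) else 0)
  seq1 ++ temp1

theorem length_aStep (seq : List Int) : (aStep seq).length = 2 * seq.length + 1 := by
  unfold aStep
  rw [PySem.List.foldl_append_singleton_eq_map]
  simp [PySem.List.pyRange_one]
  omega

def aLoop (n : Int) (seq : List Int) : List Int :=
  if h : (seq.length : Int) < n then aLoop n (aStep seq) else seq
  termination_by (n - seq.length).toNat
  decreasing_by
    have := length_aStep seq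
    omega

def unfold_dragon (n : Int) : List Int :=
  PySem.List.slice (aLoop n [0]) (some 0) (some n)

-- ===== PORT B =====
-- while k % 2 == 0: k //= 2   (the 0 < k guard only makes the same computation total;
-- B only calls it with k = i+1 ≥ 1)
def stripTwos (k : Int) : Int :=
  if h : 0 < k ∧ PySem.Int.mod k 2 = 0 then stripTwos (PySem.Int.floordiv k 2) else k
  termination_by k.toNat
  decreasing_by
    rw [PySem.Int.floordiv_eq_ediv_of_pos (by omega)]
    omega

def unfold_dragon_alt (n : Int) : List Int :=
  (PySem.List.pyRange 0 n 1).foldl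
    (fun res i =>
      let k := stripTwos (i + 1)
      res ++ [if PySem.Int.mod k 4 = 1 then (0 : Int) else 1]) []

-- ===== PRECONDITION & SPEC =====
def Spec_unfold_dragon (n : Int) (out : List Int) : Prop := out = unfold_dragon_alt n
instance (n : Int) (out : List Int) : Decidable (Spec_unfold_dragon n out) := by unfold Spec_unfold_dragon; infer_instance

-- ===== CLAIM (what is proved, stated in full; the proofs are below) =====
def Claim_equal_unfold_dragon : Prop := ∀ (n : Int), Dom_unfold_dragon n → Spec_unfold_dragon n (unfold_dragon n)

-- ===== LEMMAS AND PROOFS =====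

-- odd part of a natural number (proof-side mirror of stripTwos)
def oddPart (k : Nat) : Nat :=
  if h : 0 < k ∧ k % 2 = 0 then oddPart (k / 2) else k
  termination_by k
  decreasing_by omega

-- the paper-folding value at 1-based index k, complemented as A produces it
def pfv (k : Nat) : Int := if oddPart k % 4 = 1 then 0 else 1

-- the intended sequence of length L
def F (L : Nat) : List Int := (List.range L).map (fun i => pfv (i + 1))

theorem oddPart_odd (k : Nat) (h : k % 2 = 1) : oddPart k = k := by
  rw [oddPart]; simp [h]

theorem oddPart_two_mul (k : Nat) (h : 0 < k) : oddPart (2 * k) = oddPart k := by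
  rw [oddPart, dif_pos (show 0 < 2 * k ∧ 2 * k % 2 = 0 by omega)]
  congr 1
  omega

theorem oddPart_pow (m : Nat) : oddPart (2 ^ m) = 1 := by
  induction m with
  | zero => rw [oddPart]; simp
  | succ m ih =>
    rw [show (2 : Nat) ^ (m + 1) = 2 * 2 ^ m by rw [pow_succ]; ring,
      oddPart_two_mul _ (Nat.two_pow_pos m)]
    exact ih

theorem stripTwos_natCast (k : Nat) : stripTwos (k : Int) = (oddPart k : Int) := by
  induction k using Nat.strong_induction_on with
  | _ k ih =>
    rw [stripTwos, oddPart]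
    by_cases h : 0 < k ∧ k % 2 = 0
    · have h1 : 0 < (k : Int) ∧ PySem.Int.mod (k : Int) 2 = 0 := by
        constructor
        · exact_mod_cast h.1
        · rw [show ((2:Int)) = ((2:Nat):Int) by norm_num, PySem.Int.mod_natCast]
          exact_mod_cast h.2
      rw [dif_pos h1, dif_pos h]
      rw [show ((2:Int)) = ((2:Nat):Int) by norm_num, PySem.Int.floordiv_natCast]
      exact ih (k / 2) (by omega)
    · have h1 : ¬ (0 < (k : Int) ∧ PySem.Int.mod (k : Int) 2 = 0) := by
        intro hc
        apply h
        constructor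
        · exact_mod_cast hc.1
        · have := hc.2
          rw [show ((2:Int)) = ((2:Nat):Int) by norm_num, PySem.Int.mod_natCast] at this
          exact_mod_cast this
      rw [dif_neg h1, dif_neg h]

-- pfv at a power of two is 0
theorem pfv_pow (m : Nat) : pfv (2 ^ m) = 0 := by
  simp [pfv, oddPart_pow]

-- the self-similarity: pfv is anti-symmetric around a power of two
theorem pfv_symm (m : Nat) : ∀ s : Nat, 0 < s → s < 2 ^ m →
    pfv (2 ^ m + s) + pfv (2 ^ m - s) = 1 := by
  induction m with
  | zero => intro s h1 h2; omega
  | succ m ih =>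
    intro s h1 h2
    have hp : (2 : Nat) ^ (m + 1) = 2 * 2 ^ m := by rw [pow_succ]; ring
    have hN2 : 0 < 2 ^ m := Nat.two_pow_pos m
    by_cases he : s % 2 = 0
    · -- even s: halve everything
      have hs2 : 0 < s / 2 := by omega
      have hN : 2 ^ (m + 1) + s = 2 * (2 ^ m + s / 2) := by omega
      have hM : 2 ^ (m + 1) - s = 2 * (2 ^ m - s / 2) := by omega
      rw [pfv, pfv, hN, hM, oddPart_two_mul _ (by omega), oddPart_two_mul _ (by omega)]
      have := ih (s / 2) hs2 (by omega)
      rw [pfv, pfv] at this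
      exact this
    · -- odd s: both 2^(m+1) ± s are odd, compare mod 4
      have ho1 : (2 ^ (m + 1) + s) % 2 = 1 := by omega
      have ho2 : (2 ^ (m + 1) - s) % 2 = 1 := by omega
      rw [pfv, pfv, oddPart_odd _ ho1, oddPart_odd _ ho2]
      rcases Nat.eq_zero_or_pos m with hm | hm
      · subst hm
        interval_cases s
        · decide
      · have h4 : 2 ^ (m + 1) % 4 = 0 := by
          have : (2 : Nat) ^ (m + 1) = 4 * 2 ^ (m - 1) := by
            rw [show m + 1 = (m - 1) + 2 by omega, pow_add]
            ring
          omega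
        split_ifs with c1 c2 c2 <;> omega

-- pfv only takes values 0 and 1, and A's complement flips it
theorem comp_pfv (k : Nat) : (if pfv k == 0 then (1 : Int) else 0) = 1 - pfv k := by
  rw [pfv]; split_ifs <;> simp_all

-- the temp-building foldl of aStep produces seq.reverse
theorem aStep_temp (seq : List Int) :
    (PySem.List.pyRange 0 (seq.length : Int) 1).foldl
      (fun acc i => acc ++ [PySem.List.pyGetD seq (-(i + 1)) 0]) ([] : List Int)
    = seq.reverse := by
  rw [PySem.List.foldl_append_singleton_eq_map, PySem.List.pyRange_one]
  simp only [Int.sub_zero, Int.toNat_natCast, List.map_map]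
  apply List.ext_getElem
  · simp
  · intro j hj hj'
    simp only [List.nil_append, List.getElem_map, List.getElem_range,
      Function.comp_apply, List.getElem_reverse]
    have hlen : j < seq.length := by simpa using hj
    rw [show (0 : Int) + (j : Int) + 1 = ((j + 1 : Nat) : Int) by push_cast; ring,
      PySem.List.pyGetD_neg_natCast seq (j + 1) 0 (by omega) (by omega)]
    congr 1
    omega

-- one step of A's loop on the intended sequence of length 2^m - 1
theorem aStep_F (m : Nat) : aStep (F (2 ^ m - 1)) = F (2 ^ (m + 1) - 1) := by
  have hN : 0 < 2 ^ m := Nat.two_pow_pos m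
  have key : aStep (F (2 ^ m - 1)) =
      (F (2 ^ m - 1) ++ [0]) ++
        (F (2 ^ m - 1)).reverse.map (fun x => if x == 0 then (1 : Int) else 0) := by
    unfold aStep
    rw [aStep_temp]
  rw [key, show 2 ^ (m + 1) - 1 = (2 ^ m - 1 + 1) + (2 ^ m - 1) by rw [pow_succ]; omega]
  simp only [F, List.range_add, List.range_succ, List.map_append, List.map_map]
  congr 1
  · -- the middle 0 appended by A is pfv at the power of two
    simp only [List.map_cons, List.map_nil]
    congr 1
    have := pfv_pow m
    rw [show 2 ^ m - 1 + 1 = 2 ^ m by omega]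
    rw [this]
  · -- complemented reversal equals the upper half
    apply List.ext_getElem
    · simp
    · intro t ht ht'
      simp only [List.getElem_map, List.getElem_reverse, List.getElem_range,
        Function.comp_apply]
      have hlen : t < 2 ^ m - 1 := by simpa using ht
      rw [comp_pfv]
      have hlr : (List.range (2 ^ m - 1)).length = 2 ^ m - 1 := List.length_range
      rw [show (List.map (fun i => pfv (i + 1)) (List.range (2 ^ m - 1))).length - 1 - t + 1
            = 2 ^ m - (t + 1) by simp; omega,
        show 2 ^ m - 1 + 1 + t + 1 = 2 ^ m + (t + 1) by omega]
      have := pfv_symm m (t + 1) (by omega) (by omega)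
      omega

-- running A's loop from the intended sequence stays on intended sequences
theorem aLoop_F : ∀ (k : Nat) (m : Nat) (n : Int),
    (n - ((2 ^ m - 1 : Nat) : Int)).toNat ≤ k →
    ∃ M : Nat, aLoop n (F (2 ^ m - 1)) = F (2 ^ M - 1) ∧ n ≤ ((2 ^ M - 1 : Nat) : Int) := by
  intro k
  induction k with
  | zero =>
    intro m n hk
    have hF : (F (2 ^ m - 1)).length = 2 ^ m - 1 := by simp [F]
    have hnot : ¬ ((F (2 ^ m - 1)).length : Int) < n := by rw [hF]; omega
    rw [aLoop, dif_neg hnot]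
    rw [hF] at hnot
    exact ⟨m, rfl, by omega⟩
  | succ k ih =>
    intro m n hk
    have hF : (F (2 ^ m - 1)).length = 2 ^ m - 1 := by simp [F]
    have h2 : (2 : Nat) ^ (m + 1) = 2 * 2 ^ m := by rw [pow_succ]; ring
    have hN : 0 < 2 ^ m := Nat.two_pow_pos m
    by_cases h : (((2 ^ m - 1 : Nat) : Int) < n)
    · have h' : ((F (2 ^ m - 1)).length : Int) < n := by rw [hF]; exact_mod_cast h
      rw [aLoop, dif_pos h', aStep_F]
      apply ih (m + 1)
      omega
    · have h' : ¬ ((F (2 ^ m - 1)).length : Int) < n := by rw [hF]; exact_mod_cast h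
      rw [aLoop, dif_neg h']
      exact ⟨m, rfl, by omega⟩

-- B's port computes the intended sequence
theorem alt_eq_F (n : Int) : unfold_dragon_alt n = F n.toNat := by
  rw [unfold_dragon_alt, PySem.List.foldl_append_singleton_eq_map, PySem.List.pyRange_one]
  simp only [Int.sub_zero, List.map_map, List.nil_append, F]
  apply List.map_congr_left
  intro k hk
  simp only [Function.comp_apply]
  rw [show (0 : Int) + (k : Int) + 1 = ((k + 1 : Nat) : Int) by push_cast; ring,
    stripTwos_natCast,
    show ((4:Int)) = ((4:Nat):Int) by norm_num, PySem.Int.mod_natCast, pfv]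
  by_cases h : oddPart (k + 1) % 4 = 1
  · simp [h]
  · simp only [h, if_false]
    rw [if_neg (by omega)]

-- ===== VERDICT (by name: the statement is the Claim_ definition above) =====
theorem unfold_dragon_spec : Claim_equal_unfold_dragon := by
  intro n _
  unfold Spec_unfold_dragon unfold_dragon
  rw [alt_eq_F]
  have h10 : ([(0 : Int)]) = F (2 ^ 1 - 1) := by
    rw [F, show (2 : Nat) ^ 1 - 1 = 1 by norm_num, show List.range 1 = [0] from rfl]
    simp [pfv, oddPart_odd 1 (by norm_num)]
  by_cases hn0 : n ≤ 0
  · have hstop : aLoop n [0] = [0] := by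
      rw [aLoop, dif_neg (by simp; omega)]
    rw [hstop, show n.toNat = 0 by omega]
    simp only [F, List.range_zero, List.map_nil]
    unfold PySem.List.slice PySem.List.clampIdx
    simp only [List.length_singleton]
    split_ifs <;> simp_all <;> omega
  · rw [h10]
    obtain ⟨M, hM, hn⟩ :=
      aLoop_F (n - ((2 ^ 1 - 1 : Nat) : Int)).toNat 1 n (le_refl _)
    rw [hM]
    rw [PySem.List.slice_zero_start, PySem.List.slice_to _ (by omega : (0:Int) ≤ n)]
    rw [F, ← List.map_take, List.take_range, ← F]
    congr 1
    omega
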